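-- pv_equiv track=rewrite | github.com/sthr630-sirius/paiza_heap_dijkstra | a_step8.py | heap_push
-- ===== SOURCE A (Python) =====
-- def heap_push(arr, word_arr, x, word):
--     arr.append(x)
--     word_arr.append(word)
--
--     now_node = len(arr)-1
--     while now_node > 0:
--         parent_node = (now_node-1) // 2
--         if arr[parent_node] > arr[now_node]:
--             arr[parent_node], arr[now_node] = arr[now_node], arr[parent_node]
--             word_arr[parent_node], word_arr[now_node] = word_arr[now_node], word_arr[parent_node]
--             now_node = parent_node
--         else:
--             break
--
--     return arr, word_arr
-- ===== SOURCE B (Python) =====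
-- def heap_push(arr, word_arr, x, word):
--     arr = arr + [x]
--     word_arr = word_arr + [word]
--     n = len(arr) - 1
--     # ancestor chain from the new slot up to the root
--     chain = [n]
--     while chain[-1] > 0:
--         chain.append((chain[-1] - 1) // 2)
--     # climb depth: longest streak of ancestors with a strictly larger key
--     k = 0
--     while k + 1 < len(chain) and arr[chain[k + 1]] > x:
--         k += 1
--     # the climbed chain rotates: each climbed ancestor drops to its child slot,
--     # and the bottom entry rises to chain[k]
--     perm = {chain[i]: chain[i + 1] for i in range(k)}
--     perm[chain[k]] = chain[0]
--     new_arr = [arr[perm.get(i, i)] for i in range(len(arr))]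
--     new_words = [word_arr[perm.get(i, i)] for i in range(len(word_arr))]
--     return new_arr, new_words
-- ===== Notes on version B (the rewrite author's own statement) =====
-- stated objective: alternative
-- what changed: Instead of A's in-place bottom-up swap loop, B works in staged passes: it materializes the ancestor chain of the new slot, counts the climb depth along it, builds the cyclic-rotation permutation of the climbed chain as a map, and rebuilds both output lists functionally in one comprehension each (no in-place swaps; B also does not mutate its arguments).
import Mathlib
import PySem

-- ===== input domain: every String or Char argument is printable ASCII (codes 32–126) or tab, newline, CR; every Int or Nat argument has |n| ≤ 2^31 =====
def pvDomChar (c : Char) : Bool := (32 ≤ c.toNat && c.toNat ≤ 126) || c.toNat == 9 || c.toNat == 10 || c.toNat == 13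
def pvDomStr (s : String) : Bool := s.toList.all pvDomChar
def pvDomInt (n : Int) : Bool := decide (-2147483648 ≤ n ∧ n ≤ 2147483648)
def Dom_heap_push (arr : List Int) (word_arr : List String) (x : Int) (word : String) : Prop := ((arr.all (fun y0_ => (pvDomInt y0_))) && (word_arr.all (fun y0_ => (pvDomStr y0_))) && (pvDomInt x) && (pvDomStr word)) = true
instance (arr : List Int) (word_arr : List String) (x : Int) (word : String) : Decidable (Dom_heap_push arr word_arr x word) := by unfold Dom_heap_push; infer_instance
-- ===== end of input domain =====

-- B replaces A's in-place swap loop by three staged passes (ancestor chain, climb count, functional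
-- rebuild through a move map); equivalence is about the RETURN value (A also mutates its list
-- arguments in place, B does not).

-- ===== PORT A =====
-- A's while loop: swap with the parent while the parent key is strictly larger, then stop.
-- Indices are nonnegative and in range throughout, so List.getD/set is exact for Python indexing here.
def heapALoop (arr : List Int) (wa : List String) (now : Nat) : List Int × List String :=
  if now > 0 then
    if arr.getD ((now - 1) / 2) 0 > arr.getD now 0 then
      heapALoop ((arr.set ((now - 1) / 2) (arr.getD now 0)).set now (arr.getD ((now - 1) / 2) 0))
                ((wa.set ((now - 1) / 2) (wa.getD now "")).set now (wa.getD ((now - 1) / 2) ""))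
                ((now - 1) / 2)
    else (arr, wa)
  else (arr, wa)
  decreasing_by omega

def heap_push (arr : List Int) (word_arr : List String) (x : Int) (word : String) : List Int × List String :=
  let arr := arr ++ [x]
  let word_arr := word_arr ++ [word]
  heapALoop arr word_arr (arr.length - 1)

-- ===== PORT B =====
-- chain = [n]; while chain[-1] > 0: chain.append((chain[-1]-1)//2)  — same list, built recursively
def pyChain (now : Nat) : List Nat :=
  now :: (if _h : now > 0 then pyChain ((now - 1) / 2) else [])
  decreasing_by omega

-- k = 0; while k+1 < len(chain) and arr[chain[k+1]] > x: k += 1  (chain indices are in range of arr)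
def pyClimb (arr : List Int) (x : Int) : List Nat → Nat
  | _ :: b :: rest => if arr.getD b 0 > x then 1 + pyClimb arr x (b :: rest) else 0
  | _ => 0

-- move = {chain[i]: chain[i+1] for i in range(k)}
def pyMoves (chain : List Nat) (k : Nat) : PySem.Dict Nat Nat :=
  (List.range k).foldl (fun d i => d.insert (chain.getD i 0) (chain.getD (i + 1) 0)) PySem.Dict.empty

-- [l[perm.get(i, i)] for i in range(len(l))]  (inside Pre_ every read index is in range, so getD is exact)
def pyRebuild {α : Type} (l : List α) (d0 : α) (perm : PySem.Dict Nat Nat) : List α :=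
  (List.range l.length).map (fun i => l.getD (perm.getD i i) d0)

def heap_push_alt (arr : List Int) (word_arr : List String) (x : Int) (word : String) : List Int × List String :=
  let arr := arr ++ [x]
  let word_arr := word_arr ++ [word]
  let n := arr.length - 1
  let chain := pyChain n
  let k := pyClimb arr x chain
  -- perm = {chain[i]: chain[i+1] for i in range(k)}; perm[chain[k]] = chain[0]
  let perm := (pyMoves chain k).insert (chain.getD k 0) (chain.getD 0 0)
  (pyRebuild arr 0 perm, pyRebuild word_arr "" perm)

-- ===== PRECONDITION & SPEC =====
-- Pre_ excludes exactly the inputs on which A raises IndexError: a word_arr SHORTER than arr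
-- combined with a sift-up (first parent key strictly above x) makes A index word_arr out of range.
def Pre_heap_push (arr : List Int) (word_arr : List String) (x : Int) (word : String) : Prop :=
  arr.length ≤ word_arr.length ∨ arr.getD ((arr.length - 1) / 2) 0 ≤ x
instance (arr : List Int) (word_arr : List String) (x : Int) (word : String) : Decidable (Pre_heap_push arr word_arr x word) := by unfold Pre_heap_push; infer_instance

def pvWitness_heap_push : List Int × List String × Int × String := ([2, 5], ["b", "e"], 1, "a")

def Spec_heap_push (arr : List Int) (word_arr : List String) (x : Int) (word : String) (out : List Int × List String) : Prop := out = heap_push_alt arr word_arr x word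
instance (arr : List Int) (word_arr : List String) (x : Int) (word : String) (out : List Int × List String) : Decidable (Spec_heap_push arr word_arr x word out) := by unfold Spec_heap_push; infer_instance

-- ===== CLAIM =====
def Claim_equal_heap_push : Prop := ∀ (arr : List Int) (word_arr : List String) (x : Int) (word : String), Dom_heap_push arr word_arr x word → Pre_heap_push arr word_arr x word → Spec_heap_push arr word_arr x word (heap_push arr word_arr x word)

-- ===== LEMMAS AND PROOFS =====

-- proof-only view of B's rebuild: the rotation map split into its last entry (dest receives l[m])
def pyRebuildV {α : Type} (l : List α) (v : α) (d0 : α) (mv : PySem.Dict Nat Nat) (dest : Nat) : List α :=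
  (List.range l.length).map (fun i => if i = dest then v else l.getD (mv.getD i i) d0)

theorem rebuild_insert {α : Type} (l : List α) (d0 : α) (mv : PySem.Dict Nat Nat) (dest m : Nat) :
    pyRebuild l d0 (mv.insert dest m) = pyRebuildV l (l.getD m d0) d0 mv dest := by
  apply List.ext_getElem
  · simp [pyRebuild, pyRebuildV]
  · intro j h1 h2
    simp only [pyRebuild, pyRebuildV, List.getElem_map, List.getElem_range,
      PySem.Dict.getD_insert]
    split_ifs <;> rfl

theorem pyChain_def (m : Nat) :
    pyChain m = m :: (if m > 0 then pyChain ((m - 1) / 2) else []) := by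
  rw [pyChain]; split_ifs <;> rfl

theorem chain_head (m : Nat) : (pyChain m).getD 0 0 = m := by
  rw [pyChain_def]; rfl

theorem chain_mem_le : ∀ m j, j ∈ pyChain m → j ≤ m := by
  intro m
  induction m using Nat.strong_induction_on with
  | _ m ih =>
    intro j hj
    rw [pyChain_def] at hj
    rcases List.mem_cons.mp hj with h | h
    · omega
    · by_cases h0 : m > 0
      · rw [if_pos h0] at h
        have := ih ((m - 1) / 2) (by omega) j h
        omega
      · rw [if_neg h0] at h; simp at h

-- every positional read of a list bounded by m stays below m (default 0 included)
theorem getD_lt_of_forall (t : List Nat) (k m : Nat) (hm : 0 < m) (ht : ∀ j ∈ t, j < m) :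
    t.getD k 0 < m := by
  rcases Nat.lt_or_ge k t.length with h | h
  · rw [List.getD_eq_getElem t 0 h]; exact ht _ (List.getElem_mem h)
  · rw [List.getD_eq_default t 0 h]; exact hm

theorem climb_set (x v : Int) (m : Nat) (l : List Int) :
    ∀ c : List Nat, (∀ j ∈ c, j < m) → pyClimb (l.set m v) x c = pyClimb l x c := by
  intro c
  induction c with
  | nil => intro _; rfl
  | cons a t iht =>
    intro hc
    match t with
    | [] => rfl
    | b :: rest =>
      have hb : b < m := hc b (by simp)
      have hg : (l.set m v).getD b 0 = l.getD b 0 := by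
        simp [List.getD, List.getElem?_set_ne (by omega : m ≠ b)]
      simp only [pyClimb, hg]
      split_ifs with h
      · have := iht (fun j hj => hc j (List.mem_cons_of_mem a hj))
        omega
      · rfl

theorem moves_succ (c : List Nat) (k : Nat) :
    pyMoves c (k + 1) = (pyMoves c k).insert (c.getD k 0) (c.getD (k + 1) 0) := by
  simp [pyMoves, List.range_succ]

theorem moves_getD_of_ge (m : Nat) (hm : 0 < m) (t : List Nat) (ht : ∀ j ∈ t, j < m) :
    ∀ k i, m ≤ i → (pyMoves t k).getD i i = i := by
  intro k
  induction k with
  | zero => intro i _; simp [pyMoves, PySem.Dict.getD_empty]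
  | succ k ihk =>
    intro i hi
    rw [moves_succ, PySem.Dict.getD_insert]
    have := getD_lt_of_forall t k m hm ht
    rw [if_neg (by omega), ihk i hi]

theorem moves_getD_lt (m : Nat) (hm : 0 < m) (t : List Nat) (ht : ∀ j ∈ t, j < m) :
    ∀ k i, i < m → (pyMoves t k).getD i i < m := by
  intro k
  induction k with
  | zero => intro i hi; simpa [pyMoves, PySem.Dict.getD_empty] using hi
  | succ k ihk =>
    intro i hi
    rw [moves_succ, PySem.Dict.getD_insert]
    split_ifs
    · exact getD_lt_of_forall t (k + 1) m hm ht
    · exact ihk i hi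

theorem moves_cons (now : Nat) (hnow : 0 < now) (t : List Nat) (ht : ∀ j ∈ t, j < now) :
    ∀ k i, (pyMoves (now :: t) (k + 1)).getD i i =
      if i = now then t.getD 0 0 else (pyMoves t k).getD i i := by
  intro k
  induction k with
  | zero =>
    intro i
    rw [moves_succ, PySem.Dict.getD_insert]
    simp [pyMoves, PySem.Dict.getD_empty]
  | succ k ihk =>
    intro i
    have hg1 : (now :: t).getD (k + 1) 0 = t.getD k 0 := rfl
    have hg2 : (now :: t).getD (k + 1 + 1) 0 = t.getD (k + 1) 0 := rfl
    have htk : t.getD k 0 < now := getD_lt_of_forall t k now hnow ht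
    have hr : (pyMoves t (k + 1)).getD i i =
        if i = t.getD k 0 then t.getD (k + 1) 0 else (pyMoves t k).getD i i := by
      rw [moves_succ, PySem.Dict.getD_insert]
    rw [moves_succ, hg1, hg2, PySem.Dict.getD_insert, ihk i, hr]
    split_ifs <;> first | rfl | omega

theorem moves_zero (c : List Nat) : pyMoves c 0 = PySem.Dict.empty := rfl

theorem rebuild_empty_set {α : Type} (l : List α) (v d0 : α) (dest : Nat) (h : dest < l.length) :
    pyRebuildV l v d0 PySem.Dict.empty dest = l.set dest v := by
  apply List.ext_getElem
  · simp [pyRebuildV]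
  · intro j h1 h2
    simp only [pyRebuildV, List.getElem_map, List.getElem_range, PySem.Dict.getD_empty,
      List.getElem_set]
    split_ifs with hj hj2 hj2
    · rfl
    · omega
    · omega
    · exact List.getD_eq_getElem l d0 (by simpa [pyRebuildV] using h1)

theorem rebuild_empty_id {α : Type} (l : List α) (v d0 : α) (dest : Nat) (h : l.length ≤ dest) :
    pyRebuildV l v d0 PySem.Dict.empty dest = l := by
  apply List.ext_getElem
  · simp [pyRebuildV]
  · intro j h1 h2
    simp only [pyRebuildV, List.getElem_map, List.getElem_range, PySem.Dict.getD_empty]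
    rw [if_neg (by omega)]
    exact List.getD_eq_getElem l d0 (by simpa [pyRebuildV] using h1)

-- one climbed level: the full move map over (now :: t) equals shifting l at now and using t's map
theorem rebuild_shift {α : Type} (l : List α) (v d0 : α) (now kt dest : Nat)
    (hnow : 0 < now) (hlen : now < l.length) (t : List Nat) (ht : ∀ j ∈ t, j < now) :
    pyRebuildV l v d0 (pyMoves (now :: t) (kt + 1)) dest
      = pyRebuildV (l.set now (l.getD (t.getD 0 0) d0)) v d0 (pyMoves t kt) dest := by
  apply List.ext_getElem
  · simp [pyRebuildV]
  · intro j h1 h2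
    simp only [pyRebuildV, List.getElem_map, List.getElem_range]
    split_ifs with hj
    · rfl
    · rw [moves_cons now hnow t ht kt j]
      have hjlen : j < l.length := by simpa [pyRebuildV] using h1
      by_cases hjn : j = now
      · rw [if_pos hjn]
        have hs : (pyMoves t kt).getD j j = j := moves_getD_of_ge now hnow t ht kt j (by omega)
        rw [hs, hjn]
        have : (l.set now (l.getD (t.getD 0 0) d0)).getD now d0 = l.getD (t.getD 0 0) d0 := by
          simp [List.getD, hlen]
        rw [this]
      · rw [if_neg hjn]
        have hs : (pyMoves t kt).getD j j ≠ now := by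
          rcases Nat.lt_or_ge j now with hlt | hge
          · have := moves_getD_lt now hnow t ht kt j hlt; omega
          · have := moves_getD_of_ge now hnow t ht kt j hge; omega
        rw [show (l.set now (l.getD (t.getD 0 0) d0)).getD ((pyMoves t kt).getD j j) d0
              = l.getD ((pyMoves t kt).getD j j) d0 by
          simp [List.getD, List.getElem?_set_ne (Ne.symm hs)]]

theorem append_set_self {α : Type} (l : List α) (x : α) : (l ++ [x]).set l.length x = l ++ [x] := by
  apply List.ext_getElem <;> simp

-- Main invariant: A's loop state (x/word already written at `now`) equals B's staged rebuild.
theorem loop_eq (x : Int) (word : String) :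
    ∀ now (arr : List Int) (wa : List String), now < arr.length → now < wa.length →
      heapALoop (arr.set now x) (wa.set now word) now =
        (pyRebuildV arr x 0 (pyMoves (pyChain now) (pyClimb arr x (pyChain now)))
           ((pyChain now).getD (pyClimb arr x (pyChain now)) 0),
         pyRebuildV wa word "" (pyMoves (pyChain now) (pyClimb arr x (pyChain now)))
           ((pyChain now).getD (pyClimb arr x (pyChain now)) 0)) := by
  intro now
  induction now using Nat.strong_induction_on with
  | _ now ih =>
    intro arr wa ha hw
    by_cases h0 : now > 0
    · have hp : (now - 1) / 2 ≠ now := by omega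
      have hplt : (now - 1) / 2 < now := by omega
      have hchain : pyChain now = now :: pyChain ((now - 1) / 2) := by
        rw [pyChain_def, if_pos h0]
      have ht : ∀ j ∈ pyChain ((now - 1) / 2), j < now :=
        fun j hj => lt_of_le_of_lt (chain_mem_le _ j hj) hplt
      have htt : pyChain ((now - 1) / 2)
          = (now - 1) / 2 :: (if (now - 1) / 2 > 0 then pyChain (((now - 1) / 2 - 1) / 2) else []) :=
        pyChain_def _
      have hgp : (arr.set now x).getD ((now - 1) / 2) 0 = arr.getD ((now - 1) / 2) 0 := by
        simp [List.getD, List.getElem?_set_ne (Ne.symm hp)]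
      have hgn : (arr.set now x).getD now 0 = x := by
        simp [List.getD, ha]
      -- B's climb count along the chain
      have hclimb : pyClimb arr x (pyChain now)
          = if arr.getD ((now - 1) / 2) 0 > x
            then 1 + pyClimb arr x (pyChain ((now - 1) / 2)) else 0 := by
        rw [hchain, htt]
        simp only [pyClimb, ← htt]
      rw [heapALoop, if_pos h0, hgp, hgn]
      by_cases hc : arr.getD ((now - 1) / 2) 0 > x
      · rw [if_pos hc, hclimb, if_pos hc]
        have hwp : (wa.set now word).getD ((now - 1) / 2) "" = wa.getD ((now - 1) / 2) "" := by
          simp [List.getD, List.getElem?_set_ne (Ne.symm hp)]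
        have hwn : (wa.set now word).getD now "" = word := by
          simp [List.getD, hw]
        rw [hwp, hwn]
        -- A's swapped state is B's shifted base with x re-written at the parent
        have e1 : ((arr.set now x).set ((now - 1) / 2) x).set now (arr.getD ((now - 1) / 2) 0)
            = (arr.set now (arr.getD ((now - 1) / 2) 0)).set ((now - 1) / 2) x := by
          rw [List.set_comm _ _ (Ne.symm hp), List.set_set, List.set_comm _ _ hp]
        have e2 : ((wa.set now word).set ((now - 1) / 2) word).set now (wa.getD ((now - 1) / 2) "")
            = (wa.set now (wa.getD ((now - 1) / 2) "")).set ((now - 1) / 2) word := by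
          rw [List.set_comm _ _ (Ne.symm hp), List.set_set, List.set_comm _ _ hp]
        rw [e1, e2]
        have hIH := ih ((now - 1) / 2) hplt
          (arr.set now (arr.getD ((now - 1) / 2) 0)) (wa.set now (wa.getD ((now - 1) / 2) ""))
          (by simp; omega) (by simp; omega)
        rw [hIH]
        -- the climb over the shifted base equals the climb over arr (chain stays below now)
        have hcs : pyClimb (arr.set now (arr.getD ((now - 1) / 2) 0)) x (pyChain ((now - 1) / 2))
            = pyClimb arr x (pyChain ((now - 1) / 2)) := climb_set x _ now arr _ ht
        rw [hcs]
        have ht0 : (pyChain ((now - 1) / 2)).getD 0 0 = (now - 1) / 2 := by rw [htt]; rfl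
        have hdest : (pyChain now).getD (1 + pyClimb arr x (pyChain ((now - 1) / 2))) 0
            = (pyChain ((now - 1) / 2)).getD (pyClimb arr x (pyChain ((now - 1) / 2))) 0 := by
          rw [hchain, Nat.add_comm 1 _]; rfl
        rw [hdest]
        have hk1 : 1 + pyClimb arr x (pyChain ((now - 1) / 2))
            = pyClimb arr x (pyChain ((now - 1) / 2)) + 1 := Nat.add_comm _ _
        rw [hchain, hk1,
          rebuild_shift arr x 0 now _ _ h0 ha _ ht,
          rebuild_shift wa word "" now _ _ h0 hw _ ht, ht0]
      · rw [if_neg hc, hclimb, if_neg hc, moves_zero]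
        have hdest : (pyChain now).getD 0 0 = now := by rw [hchain]; rfl
        rw [hdest, rebuild_empty_set arr x 0 now ha, rebuild_empty_set wa word "" now hw]
    · have hn : now = 0 := by omega
      subst hn
      rw [heapALoop]
      simp only [gt_iff_lt, Nat.lt_irrefl, if_false]
      have hchain : pyChain 0 = [0] := by rw [pyChain_def]; simp
      rw [hchain]
      simp only [pyClimb, moves_zero]
      rw [show ([0] : List Nat).getD 0 0 = 0 from rfl,
        rebuild_empty_set arr x 0 0 ha, rebuild_empty_set wa word "" 0 hw]

-- ===== VERDICT =====
theorem heap_push_spec : Claim_equal_heap_push := by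
  intro arr word_arr x word _ hpre
  unfold Spec_heap_push heap_push heap_push_alt
  have hlen : (arr ++ [x]).length - 1 = arr.length := by simp
  simp only [hlen]
  rw [chain_head, rebuild_insert, rebuild_insert]
  have hgx : (arr ++ [x]).getD arr.length 0 = x := by simp [List.getD]
  rw [hgx]
  by_cases hle : arr.length ≤ word_arr.length
  · -- word list at least as long: the rotation carries whatever sits in the bottom slot
    have hwlen : arr.length < (word_arr ++ [word]).length := by simp; omega
    have := loop_eq x ((word_arr ++ [word]).getD arr.length "") arr.length
      (arr ++ [x]) (word_arr ++ [word]) (by simp) hwlen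
    rw [append_set_self arr x] at this
    rw [show (word_arr ++ [word]).set arr.length ((word_arr ++ [word]).getD arr.length "")
          = word_arr ++ [word] by
        rw [List.getD_eq_getElem _ _ hwlen]; exact List.set_getElem_self hwlen] at this
    exact this
  · -- shorter word list, hence (Pre_) no sift: both sides are the plain appends
    have hlt : word_arr.length < arr.length := by omega
    have hsle : arr.getD ((arr.length - 1) / 2) 0 ≤ x := by
      rcases hpre with h | h
      · omega
      · exact h
    have ha0 : 0 < arr.length := by omega
    have hp2 : (arr.length - 1) / 2 < arr.length := by omega
    have hgp : (arr ++ [x]).getD ((arr.length - 1) / 2) 0 = arr.getD ((arr.length - 1) / 2) 0 := by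
      simp [List.getD, List.getElem?_append_left hp2]
    have hchain : pyChain arr.length = arr.length :: pyChain ((arr.length - 1) / 2) := by
      rw [pyChain_def, if_pos ha0]
    have htt : pyChain ((arr.length - 1) / 2) = (arr.length - 1) / 2 ::
        (if (arr.length - 1) / 2 > 0 then pyChain (((arr.length - 1) / 2 - 1) / 2) else []) :=
      pyChain_def _
    have hclimb : pyClimb (arr ++ [x]) x (pyChain arr.length) = 0 := by
      rw [hchain, htt]
      simp only [pyClimb, hgp]
      rw [if_neg (by omega)]
    rw [heapALoop, if_pos ha0, hgp, hgx, if_neg (by omega), hclimb, moves_zero]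
    have hdest : (pyChain arr.length).getD 0 0 = arr.length := by rw [hchain]; rfl
    rw [hdest, rebuild_empty_set (arr ++ [x]) x 0 arr.length (by simp),
      append_set_self arr x,
      rebuild_empty_id (word_arr ++ [word]) ((word_arr ++ [word]).getD arr.length "") ""
        arr.length (by simp; omega)]
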